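-- pv_equiv track=rewrite | github.com/MusaUnleashed/PythonGoogleRichman | classExcs/list/ex184.py | list_of_rules
-- ===== SOURCE A (Python) =====
-- def list_of_rules(num: int) -> set[str]:
--     # Define the rules dictionary
--     rules_dict = {
--         1: "...",
--         2: "..X",
--         4: ".X.",
--         8: ".XX",
--         16: "X..",
--         32: "X.X",
--         64: "XX.",
--         128: "XXX",
--     }
--
--     # Use bitwise operations to find active rules
--     return {rules_dict[rule] for rule in rules_dict if num & rule}
-- ===== SOURCE B (Python) =====
-- def list_of_rules(num: int) -> set[str]:
--     def go(depth: int, idx: int, pattern: str) -> set[str]: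
--         if depth == 0:
--             return {pattern} if num & (1 << idx) else set()
--         return go(depth - 1, 2 * idx, pattern + '.') | go(depth - 1, 2 * idx + 1, pattern + 'X')
--     return go(3, 0, '')
-- ===== Notes on version B (the rewrite author's own statement) =====
-- stated objective: alternative
-- what changed: The hard-coded rule dictionary and the loop over its keys are replaced by a depth-three binary tree recursion that builds each pattern character by character ('.' for a zero bit of the index, 'X' for a one bit) and tests the corresponding bit of num only at the leaves, uniting the sub-results.
import Mathlib
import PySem

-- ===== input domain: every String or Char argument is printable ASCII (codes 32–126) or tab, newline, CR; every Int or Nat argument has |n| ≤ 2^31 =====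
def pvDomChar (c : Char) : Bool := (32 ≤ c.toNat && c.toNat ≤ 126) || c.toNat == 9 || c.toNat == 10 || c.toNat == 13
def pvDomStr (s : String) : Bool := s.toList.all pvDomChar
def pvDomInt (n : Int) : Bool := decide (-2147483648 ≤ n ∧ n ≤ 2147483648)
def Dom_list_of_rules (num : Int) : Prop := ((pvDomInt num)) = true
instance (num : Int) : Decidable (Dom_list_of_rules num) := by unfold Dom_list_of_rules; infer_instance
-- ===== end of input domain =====

-- B replaces A's rule dictionary and loop with a depth-3 binary tree recursion building each pattern and testing bits at the leaves (alternative decomposition, same cost).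


-- ===== PORT A =====
-- the dict literal, in insertion order
def pvRulesDict : PySem.Dict Int String :=
  PySem.Dict.ofList [(1, "..."), (2, "..X"), (4, ".X."), (8, ".XX"),
   (16, "X.."), (32, "X.X"), (64, "XX."), (128, "XXX")]

-- {rules_dict[rule] for rule in rules_dict if num & rule}; rule ∈ keys, so the
-- lookup rules_dict[rule] always succeeds and getD's default "" is never used.
def list_of_rules (num : Int) : List String :=
  (PySem.Dict.keys pvRulesDict).foldl
    (fun s rule =>
      if PySem.Int.band num rule ≠ 0 then
        PySem.Set.add s (PySem.Dict.getD pvRulesDict rule "")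
      else s)
    PySem.Set.empty

-- ===== PORT B =====
-- inner helper go(depth, idx, pattern); depth is a nonnegative structural counter
def pvGo (num : Int) : Nat → Int → String → List String
  | 0, idx, pattern =>
      if PySem.Int.band num ((1 : Int) <<< idx.toNat) ≠ 0 then
        PySem.Set.add PySem.Set.empty pattern
      else PySem.Set.empty
  | d + 1, idx, pattern =>
      PySem.Set.union (pvGo num d (2 * idx) (pattern ++ "."))
                      (pvGo num d (2 * idx + 1) (pattern ++ "X"))

def list_of_rules_alt (num : Int) : List String := pvGo num 3 0 ""

-- ===== PRECONDITION & SPEC =====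
def Spec_list_of_rules (num : Int) (out : List String) : Prop := out = list_of_rules_alt num
instance (num : Int) (out : List String) : Decidable (Spec_list_of_rules num out) := by unfold Spec_list_of_rules; infer_instance

-- ===== CLAIM (what is proved, stated in full; the proofs are below) =====
def Claim_equal_list_of_rules : Prop := ∀ (num : Int), Dom_list_of_rules num → Spec_list_of_rules num (list_of_rules num)

-- ===== LEMMAS AND PROOFS =====

-- ===== VERDICT (by name: the statement is the Claim_ definition above) =====
set_option maxHeartbeats 1000000 in
theorem list_of_rules_spec : Claim_equal_list_of_rules := by
  intro num _
  unfold Spec_list_of_rules list_of_rules list_of_rules_alt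
  rw [show PySem.Dict.keys pvRulesDict = [1, 2, 4, 8, 16, 32, 64, 128] from by decide]
  simp only [List.foldl, pvGo]
  norm_num
  rw [show ((1:Int) <<< (1:Nat)) = 2 from by decide,
      show ((1:Int) <<< Int.toNat (2:Int)) = 4 from by decide,
      show ((1:Int) <<< Int.toNat (3:Int)) = 8 from by decide,
      show ((1:Int) <<< Int.toNat (4:Int)) = 16 from by decide,
      show ((1:Int) <<< Int.toNat (5:Int)) = 32 from by decide,
      show ((1:Int) <<< Int.toNat (6:Int)) = 64 from by decide,
      show ((1:Int) <<< Int.toNat (7:Int)) = 128 from by decide]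
  rw [show PySem.Dict.getD pvRulesDict 1 "" = "..." from by decide,
      show PySem.Dict.getD pvRulesDict 2 "" = "..X" from by decide,
      show PySem.Dict.getD pvRulesDict 4 "" = ".X." from by decide,
      show PySem.Dict.getD pvRulesDict 8 "" = ".XX" from by decide,
      show PySem.Dict.getD pvRulesDict 16 "" = "X.." from by decide,
      show PySem.Dict.getD pvRulesDict 32 "" = "X.X" from by decide,
      show PySem.Dict.getD pvRulesDict 64 "" = "XX." from by decide,
      show PySem.Dict.getD pvRulesDict 128 "" = "XXX" from by decide]
  split_ifs <;> rfl
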